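-- pv_equiv track=rewrite | github.com/anhnktp/toppan | CamEngine/helpers/common_utils.py | map_local_id
-- ===== SOURCE A (Python) =====
-- def map_local_id(list_local_id, matched_tracks, garbage_tracks):
--     list_local_id = list(set(list_local_id) - set(garbage_tracks))
--     for i in range(0, len(list_local_id)):
--         for track_id, concated_tracks in matched_tracks.items():
--             if list_local_id[i] in concated_tracks:
--                 list_local_id[i] = track_id
--                 break
--
--     return list(set(list_local_id))
-- ===== SOURCE B (Python) =====
-- def map_local_id(list_local_id, matched_tracks, garbage_tracks):
--     reverse = {}
--     for track_id, concated_tracks in matched_tracks.items():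
--         for x in concated_tracks:
--             reverse.setdefault(x, track_id)
--     cleaned = set(list_local_id) - set(garbage_tracks)
--     return list({reverse.get(x, x) for x in cleaned})
-- ===== Notes on version B (the rewrite author's own statement) =====
-- stated objective: faster
-- what changed: Builds a reverse element->track_id dict once with setdefault (first group wins) and maps each cleaned id through one O(1) lookup, replacing A's per-id rescan of every group's list.
import Mathlib
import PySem

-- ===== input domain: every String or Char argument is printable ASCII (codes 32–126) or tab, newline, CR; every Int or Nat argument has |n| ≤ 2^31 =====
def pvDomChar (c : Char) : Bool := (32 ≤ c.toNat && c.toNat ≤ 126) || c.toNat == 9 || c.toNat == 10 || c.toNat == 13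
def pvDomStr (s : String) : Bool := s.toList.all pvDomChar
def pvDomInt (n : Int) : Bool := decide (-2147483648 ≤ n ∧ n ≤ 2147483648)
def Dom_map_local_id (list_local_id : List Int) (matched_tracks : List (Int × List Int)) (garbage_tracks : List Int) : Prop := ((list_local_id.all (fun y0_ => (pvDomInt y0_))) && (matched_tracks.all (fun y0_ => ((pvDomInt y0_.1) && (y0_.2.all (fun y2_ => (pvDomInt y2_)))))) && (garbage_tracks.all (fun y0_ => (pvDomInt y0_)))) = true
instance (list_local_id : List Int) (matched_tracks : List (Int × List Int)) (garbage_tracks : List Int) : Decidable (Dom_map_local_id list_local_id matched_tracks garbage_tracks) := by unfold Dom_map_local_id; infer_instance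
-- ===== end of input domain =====

-- B replaces A's per-id rescan of every matched group by a reverse dict built once
-- (setdefault: first group wins) plus one lookup per cleaned id (objective: faster).
-- Both return list(set(...)); results are compared as sets.

-- ===== PORT A =====
-- inner loop: 'for track_id, concated_tracks in matched_tracks.items(): if lli[i] in …: lli[i] = track_id; break'
def mapAInner (xs : List Int) (i : Int) : List (Int × List Int) → List Int
  | [] => xs
  | (track_id, concated_tracks) :: rest =>
    if concated_tracks.contains (PySem.List.pyGetD xs i 0) then
      PySem.List.pySetD xs i track_id
    else mapAInner xs i rest

def map_local_id (list_local_id : List Int) (matched_tracks : List (Int × List Int)) (garbage_tracks : List Int) : List Int :=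
  let lli := PySem.Set.diff (PySem.Set.ofList list_local_id) garbage_tracks
  let lli := (PySem.List.pyRange 0 lli.length 1).foldl (fun xs i => mapAInner xs i matched_tracks) lli
  PySem.Set.ofList lli

-- ===== PORT B =====
-- 'for track_id, concated_tracks in matched_tracks.items(): for x in concated_tracks: reverse.setdefault(x, track_id)'
def mapBReverse (matched_tracks : List (Int × List Int)) : PySem.Dict Int Int :=
  matched_tracks.foldl
    (fun d p => p.2.foldl (fun d x => PySem.Dict.setdefault d x p.1) d)
    PySem.Dict.empty

def map_local_id_alt (list_local_id : List Int) (matched_tracks : List (Int × List Int)) (garbage_tracks : List Int) : List Int :=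
  let reverse := mapBReverse matched_tracks
  let cleaned := PySem.Set.diff (PySem.Set.ofList list_local_id) garbage_tracks
  PySem.Set.ofList (cleaned.map (fun x => PySem.Dict.getD reverse x x))

-- ===== PRECONDITION & SPEC =====
def Spec_map_local_id (list_local_id : List Int) (matched_tracks : List (Int × List Int)) (garbage_tracks : List Int) (out : List Int) : Prop := out = map_local_id_alt list_local_id matched_tracks garbage_tracks
instance (list_local_id : List Int) (matched_tracks : List (Int × List Int)) (garbage_tracks : List Int) (out : List Int) : Decidable (Spec_map_local_id list_local_id matched_tracks garbage_tracks out) := by unfold Spec_map_local_id; infer_instance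

-- ===== CLAIM (what is proved, stated in full; the proofs are below) =====
def Claim_equal_map_local_id : Prop := ∀ (list_local_id : List Int) (matched_tracks : List (Int × List Int)) (garbage_tracks : List Int), Dom_map_local_id list_local_id matched_tracks garbage_tracks → Spec_map_local_id list_local_id matched_tracks garbage_tracks (map_local_id list_local_id matched_tracks garbage_tracks)

-- ===== LEMMAS AND PROOFS =====

-- the id the first matching group (in dict order) maps x to, if any
def firstTid (x : Int) : List (Int × List Int) → Option Int
  | [] => none
  | (track_id, ct) :: rest => if ct.contains x then some track_id else firstTid x rest

-- the value A's inner scan leaves at a position holding x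
def remap (mt : List (Int × List Int)) (x : Int) : Int := (firstTid x mt).getD x

theorem set_getD_self (xs : List Int) (n : Nat) : xs.set n (xs.getD n 0) = xs := by
  by_cases h : n < xs.length
  · rw [List.getD_eq_getElem xs 0 h, List.set_getElem_self]
  · rw [List.set_eq_of_length_le (by omega)]

theorem mapAInner_eq (mt : List (Int × List Int)) (xs : List Int) (n : Nat) :
    mapAInner xs (n : Int) mt = xs.set n (remap mt (xs.getD n 0)) := by
  induction mt with
  | nil =>
    simp only [mapAInner, remap, firstTid, Option.getD_none]
    exact (set_getD_self xs n).symm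
  | cons p rest ih =>
    obtain ⟨t, ct⟩ := p
    simp only [mapAInner, remap, firstTid, PySem.List.pyGetD_natCast]
    split_ifs with h
    · simp
    · simpa [remap] using ih

theorem loop_eq_map (mt : List (Int × List Int)) (xs : List Int) (k : Nat) (hk : k ≤ xs.length) :
    (List.range k).foldl (fun ys i => mapAInner ys ((i : Nat) : Int) mt) xs
      = (xs.take k).map (remap mt) ++ xs.drop k := by
  induction k with
  | zero => simp
  | succ k ih =>
    have hk' : k ≤ xs.length := Nat.le_of_succ_le hk
    have hklt : k < xs.length := hk
    rw [List.range_succ, List.foldl_append, ih hk']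
    simp only [List.foldl_cons, List.foldl_nil]
    rw [mapAInner_eq]
    have hlen : ((xs.take k).map (remap mt)).length = k := by
      simp [List.length_take, Nat.min_eq_left hk']
    have hdrop : xs.drop k = xs[k] :: xs.drop (k + 1) := by
      rw [List.drop_eq_getElem_cons hklt]
    rw [hdrop]
    have hget : ((xs.take k).map (remap mt) ++ xs[k] :: xs.drop (k + 1)).getD k 0 = xs[k] := by
      rw [List.getD_eq_getElem _ 0 (by simp; omega)]
      rw [List.getElem_append_right (le_of_eq hlen)]
      simp
      congr 1
      omega
    rw [hget, List.set_append_right _ _ (le_of_eq hlen), hlen, Nat.sub_self, List.set_cons_zero,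
      List.take_succ_eq_append_getElem hklt, List.map_append]
    simp

theorem setdefault_loop_get? (t : Int) (ct : List Int) (d : PySem.Dict Int Int) (x : Int) :
    (ct.foldl (fun d y => PySem.Dict.setdefault d y t) d).get? x
      = ((d.get? x).or (if ct.contains x then some t else none)) := by
  induction ct generalizing d with
  | nil => cases h : d.get? x <;> simp [h]
  | cons y ct ih =>
    simp only [List.foldl_cons]
    rw [ih]
    by_cases hxy : x = y
    · subst hxy
      rw [PySem.Dict.get?_setdefault_self]
      cases h : d.get? x <;> simp [h]
    · rw [PySem.Dict.get?_setdefault_of_ne _ _ hxy]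
      cases d.get? x <;> simp [hxy]

theorem reverse_loop_get? (mt : List (Int × List Int)) (d : PySem.Dict Int Int) (x : Int) :
    (mt.foldl (fun d p => p.2.foldl (fun d y => PySem.Dict.setdefault d y p.1) d) d).get? x
      = ((d.get? x).or (firstTid x mt)) := by
  induction mt generalizing d with
  | nil => cases h : d.get? x <;> simp [h, firstTid]
  | cons p mt ih =>
    obtain ⟨t, ct⟩ := p
    simp only [List.foldl_cons]
    rw [ih, setdefault_loop_get?]
    simp only [firstTid]
    cases h : d.get? x <;> split_ifs <;> simp [h]

theorem getD_mapBReverse (mt : List (Int × List Int)) (x : Int) :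
    (mapBReverse mt).getD x x = remap mt x := by
  rw [PySem.Dict.getD_eq_get?_getD, mapBReverse, reverse_loop_get?, remap]
  simp

theorem ports_agree (l : List Int) (mt : List (Int × List Int)) (g : List Int) :
    map_local_id l mt g = map_local_id_alt l mt g := by
  unfold map_local_id map_local_id_alt
  simp only []
  congr 1
  set xs := PySem.Set.diff (PySem.Set.ofList l) g with hxs
  have : (PySem.List.pyRange 0 (xs.length : Int) 1)
      = (List.range xs.length).map (fun k => ((k : Nat) : Int)) := by
    rw [PySem.List.pyRange_one]
    simp
  rw [this, List.foldl_map, loop_eq_map mt xs xs.length le_rfl]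
  simp only [List.take_length, List.drop_length, List.append_nil]
  exact List.map_congr_left (fun x _ => (getD_mapBReverse mt x).symm)

-- ===== VERDICT (by name: the statement is the Claim_ definition above) =====
theorem map_local_id_spec : Claim_equal_map_local_id := by
  intro l mt g _
  unfold Spec_map_local_id
  exact ports_agree l mt g
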